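-- pv_equiv track=rewrite | github.com/anonymousSIGIR2020/learnTDV | IR_models.py | simple_tf
-- ===== SOURCE A (Python) =====
-- from collections import Counter
--
-- def simple_tf(indexed_queries,inverted_index):
--
--     results = []
--     for indexed_query in indexed_queries:
--         result = Counter()
--         for token in indexed_query:
--             if token in inverted_index:
--                 for document,freq in inverted_index[token].items():
--                     result[document] += freq
--         results.append(result)
--
--     return results
-- ===== SOURCE B (Python) =====
-- from collections import Counter
--
-- def _query_scores(query, inverted_index):
--     # Collapse duplicate query tokens into multiplicities, then weight each
--     # posting list once by the token's count instead of replaying it per occurrence.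
--     result = Counter()
--     for token, cnt in Counter(query).items():
--         postings = inverted_index.get(token)
--         if postings is None:
--             continue
--         for document, freq in postings.items():
--             result[document] += cnt * freq
--     return result
--
-- def simple_tf(indexed_queries, inverted_index):
--     return [_query_scores(query, inverted_index) for query in indexed_queries]
-- ===== Notes on version B (the rewrite author's own statement) =====
-- stated objective: alternative
-- what changed: B first collapses each query into token multiplicities with Counter(query) and then adds each matching posting list once, scaled by the token count, instead of replaying the posting list for every token occurrence.
import Mathlib
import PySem

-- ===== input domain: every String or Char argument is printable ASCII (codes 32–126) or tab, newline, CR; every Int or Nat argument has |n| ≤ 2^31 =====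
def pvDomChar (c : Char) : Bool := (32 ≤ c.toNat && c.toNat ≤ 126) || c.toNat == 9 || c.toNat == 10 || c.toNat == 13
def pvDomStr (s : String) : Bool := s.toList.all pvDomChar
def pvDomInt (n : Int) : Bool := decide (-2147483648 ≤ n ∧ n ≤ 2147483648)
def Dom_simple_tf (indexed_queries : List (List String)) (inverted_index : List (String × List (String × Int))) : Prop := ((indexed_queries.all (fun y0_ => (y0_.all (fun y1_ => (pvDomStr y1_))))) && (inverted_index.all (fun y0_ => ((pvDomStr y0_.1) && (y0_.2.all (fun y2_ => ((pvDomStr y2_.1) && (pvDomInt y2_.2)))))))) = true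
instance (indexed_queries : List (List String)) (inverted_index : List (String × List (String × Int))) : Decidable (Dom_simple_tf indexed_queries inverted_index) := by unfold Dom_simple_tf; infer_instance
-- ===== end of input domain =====

-- B collapses each query into token multiplicities (Counter) and adds each matching
-- posting list once, scaled by the token's count, instead of replaying it per occurrence
-- (alternative decomposition; identical per-document sums and insertion order).


-- ===== PORT A =====
-- literal port of A: for each query, a Counter `result`; for each token occurrence,
-- if the token is in the index, add each posting's freq to result[document].
def simple_tf (indexed_queries : List (List String)) (inverted_index : List (String × List (String × Int))) : List (List (String × Int)) :=
  indexed_queries.foldl (fun (results : List (List (String × Int))) indexed_query =>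
    results ++ [(indexed_query.foldl (fun (result : PySem.Dict String Int) token =>
        match List.lookup token inverted_index with
        | some postings => postings.foldl (fun (result : PySem.Dict String Int) p =>
            result.modify p.1 0 (· + p.2)) result
        | none => result) PySem.Dict.empty).items]) []

-- ===== PORT B =====
-- port of B's helper _query_scores: loop over Counter(query).items(), scale postings by cnt
def pvQueryScores (query : List String) (inverted_index : List (String × List (String × Int))) : List (String × Int) :=
  ((PySem.Dict.counter query).items.foldl (fun (result : PySem.Dict String Int) tc =>
      match List.lookup tc.1 inverted_index with
      | some postings => postings.foldl (fun (result : PySem.Dict String Int) p =>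
          result.modify p.1 0 (· + tc.2 * p.2)) result
      | none => result) PySem.Dict.empty).items

def simple_tf_alt (indexed_queries : List (List String)) (inverted_index : List (String × List (String × Int))) : List (List (String × Int)) :=
  indexed_queries.map (fun query => pvQueryScores query inverted_index)

-- ===== PRECONDITION & SPEC =====
def Spec_simple_tf (indexed_queries : List (List String)) (inverted_index : List (String × List (String × Int))) (out : List (List (String × Int))) : Prop := out = simple_tf_alt indexed_queries inverted_index
instance (indexed_queries : List (List String)) (inverted_index : List (String × List (String × Int))) (out : List (List (String × Int))) : Decidable (Spec_simple_tf indexed_queries inverted_index out) := by unfold Spec_simple_tf; infer_instance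

-- ===== CLAIM (what is proved, stated in full; the proofs are below) =====
def Claim_equal_simple_tf : Prop := ∀ (indexed_queries : List (List String)) (inverted_index : List (String × List (String × Int))), Dom_simple_tf indexed_queries inverted_index → Spec_simple_tf indexed_queries inverted_index (simple_tf indexed_queries inverted_index)

-- ===== LEMMAS AND PROOFS =====

-- the posting list a token contributes (empty when the token is not in the index)
def pvPost (inverted_index : List (String × List (String × Int))) (t : String) : List (String × Int) :=
  (List.lookup t inverted_index).getD []

-- total freq contributed to document k by an operation list
def pvSumFor (k : String) (ops : List (String × Int)) : Int :=
  ((ops.filter (fun p => p.1 == k)).map (·.2)).sum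

-- the common accumulation primitive: apply (doc, freq) add-operations to a Counter
def pvApply (ops : List (String × Int)) (d : PySem.Dict String Int) : PySem.Dict String Int :=
  ops.foldl (fun d p => d.modify p.1 0 (· + p.2)) d

theorem pvGetD_apply (ops : List (String × Int)) (d : PySem.Dict String Int) (k : String) :
    (pvApply ops d).getD k 0 = d.getD k 0 + pvSumFor k ops := by
  induction ops generalizing d with
  | nil => simp [pvApply, pvSumFor]
  | cons p ops ih =>
    simp only [pvApply, List.foldl_cons] at *
    rw [ih]
    simp only [pvSumFor, List.filter_cons]
    by_cases h : p.1 = k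
    · simp [h, add_assoc]
    · have hkp : ¬ k = p.1 := fun hk => h hk.symm
      simp [h, hkp, PySem.Dict.getD_modify]

theorem pvItems_apply (ops : List (String × Int)) :
    (pvApply ops PySem.Dict.empty).items
      = (PySem.Set.ofList (ops.map Prod.fst)).map (fun k => (k, pvSumFor k ops)) := by
  have hkeys : (pvApply ops PySem.Dict.empty).keys = PySem.Set.ofList (ops.map Prod.fst) := by
    rw [pvApply, PySem.Dict.keys_foldl_modify_key (key := Prod.fst)]
    simp [PySem.Set.update_nil_left]
  have hnd : (pvApply ops PySem.Dict.empty).keys.Nodup := by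
    rw [hkeys]; exact PySem.Set.nodup_ofList _
  rw [PySem.Dict.items_eq_map_keys _ hnd 0, hkeys]
  exact List.map_congr_left (fun k _ => by rw [pvGetD_apply]; simp)

-- A's per-query loop is pvApply of the concatenated posting lists
theorem pvFoldA (query : List String) (inverted_index : List (String × List (String × Int)))
    (d : PySem.Dict String Int) :
    query.foldl (fun (result : PySem.Dict String Int) token =>
        match List.lookup token inverted_index with
        | some postings => postings.foldl (fun (result : PySem.Dict String Int) p =>
            result.modify p.1 0 (· + p.2)) result
        | none => result) d
      = pvApply (query.flatMap (pvPost inverted_index)) d := by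
  induction query generalizing d with
  | nil => simp [pvApply]
  | cons t q ih =>
    simp only [List.foldl_cons, List.flatMap_cons, pvApply, List.foldl_append] at *
    rw [ih]
    cases h : List.lookup t inverted_index <;> simp [pvPost, h]

-- B's per-query loop is pvApply of the count-scaled posting lists
theorem pvFoldB (lst : List (String × Int)) (inverted_index : List (String × List (String × Int)))
    (d : PySem.Dict String Int) :
    lst.foldl (fun (result : PySem.Dict String Int) tc =>
        match List.lookup tc.1 inverted_index with
        | some postings => postings.foldl (fun (result : PySem.Dict String Int) p =>
            result.modify p.1 0 (· + tc.2 * p.2)) result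
        | none => result) d
      = pvApply (lst.flatMap (fun tc => (pvPost inverted_index tc.1).map (fun p => (p.1, tc.2 * p.2)))) d := by
  induction lst generalizing d with
  | nil => simp [pvApply]
  | cons tc l ih =>
    simp only [List.foldl_cons, List.flatMap_cons, pvApply, List.foldl_append] at *
    rw [ih]
    cases h : List.lookup tc.1 inverted_index <;> simp [pvPost, h, List.foldl_map]

-- dedup of a flatMap is unchanged when the outer list is dedup'd first
theorem pvOfList_flatMap_ofList (q : List String) (g : String → List String) :
    PySem.Set.ofList ((PySem.Set.ofList q).flatMap g) = PySem.Set.ofList (q.flatMap g) := by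
  induction q using List.reverseRecOn with
  | nil => rfl
  | append_singleton q x ih =>
    rw [PySem.Set.ofList_append_singleton]
    by_cases hx : x ∈ q
    · rw [PySem.Set.add_of_mem (by simpa [PySem.Set.mem_ofList] using hx), ih,
        List.flatMap_append, PySem.Set.ofList_append,
        PySem.Set.update_eq_append_filter]
      have hnil : (PySem.Set.ofList ([x].flatMap g)).filter
          (fun y => !(PySem.Set.contains (PySem.Set.ofList (q.flatMap g)) y)) = [] := by
        apply List.filter_eq_nil_iff.mpr
        intro y hy
        have hy' : y ∈ g x := by
          rw [PySem.Set.mem_ofList] at hy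
          simpa using hy
        have hmem : y ∈ q.flatMap g := List.mem_flatMap.mpr ⟨x, hx, hy'⟩
        simp [PySem.Set.contains_eq_listContains, PySem.Set.mem_ofList, hmem]
      rw [hnil, List.append_nil]
    · rw [PySem.Set.add_of_not_mem (by simpa [PySem.Set.mem_ofList] using hx),
        List.flatMap_append, List.flatMap_append, PySem.Set.ofList_append,
        PySem.Set.ofList_append, ih]

-- a sum over a list equals the count-weighted sum over its distinct elements
theorem pvSum_ite_single (x : String) (v : String → Int) :
    ∀ (u : List String), u.Nodup → x ∈ u →
      (u.map (fun t => if x = t then v t else 0)).sum = v x := by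
  intro u
  induction u with
  | nil => simp
  | cons y u ih =>
    intro hnd hm
    simp only [List.map_cons, List.sum_cons]
    by_cases hxy : x = y
    · subst hxy
      have hz : (u.map (fun t => if x = t then v t else 0)).sum = 0 := by
        apply List.sum_eq_zero
        intro z hz
        simp only [List.mem_map] at hz
        obtain ⟨t, ht, rfl⟩ := hz
        have hne : x ≠ t := fun h => (List.nodup_cons.mp hnd).1 (h ▸ ht)
        simp [hne]
      rw [hz]; simp
    · have hm' : x ∈ u := by cases hm with | head => exact absurd rfl hxy | tail _ h => exact h
      rw [ih (List.nodup_cons.mp hnd).2 hm']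
      simp [Ne.symm, hxy]

theorem pvSum_grouped (q : List String) (s : String → Int) :
    ((PySem.Set.ofList q).map (fun t => (q.count t : Int) * s t)).sum = (q.map s).sum := by
  induction q using List.reverseRecOn with
  | nil => rfl
  | append_singleton q x ih =>
    rw [List.map_append, List.sum_append, PySem.Set.ofList_append_singleton]
    simp only [List.map_singleton, List.sum_singleton]
    by_cases hx : x ∈ q
    · rw [PySem.Set.add_of_mem (by simpa [PySem.Set.mem_ofList] using hx)]
      have hcongr : (PySem.Set.ofList q).map (fun t => ((q ++ [x]).count t : Int) * s t)
          = (PySem.Set.ofList q).map (fun t => (q.count t : Int) * s t + (if x = t then s t else 0)) := by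
        apply List.map_congr_left
        intro t _
        rw [List.count_append]
        push_cast
        by_cases hxt : x = t
        · subst hxt; simp [add_mul]
        · simp [hxt]
      rw [hcongr, PySem.List.sum_map_add_int, ih,
        pvSum_ite_single x s _ (PySem.Set.nodup_ofList q) (by simpa [PySem.Set.mem_ofList] using hx)]
    · rw [PySem.Set.add_of_not_mem (by simpa [PySem.Set.mem_ofList] using hx)]
      rw [List.map_append, List.sum_append]
      simp only [List.map_singleton, List.sum_singleton]
      have h1 : (PySem.Set.ofList q).map (fun t => ((q ++ [x]).count t : Int) * s t)
          = (PySem.Set.ofList q).map (fun t => (q.count t : Int) * s t) := by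
        apply List.map_congr_left
        intro t ht
        rw [PySem.Set.mem_ofList] at ht
        have hne : ¬ t = x := fun h => hx (h ▸ ht)
        rw [List.count_append, List.count_singleton]
        simp
        exact Or.inl fun h => hne h.symm
      have h2 : ((q ++ [x]).count x : Int) = 1 := by
        rw [List.count_append, List.count_eq_zero_of_not_mem hx]
        simp
      rw [h1, h2, ih, one_mul]

theorem pvSum_flatMap {α β : Type} [AddCommMonoid β] (l : List α) (f : α → List β) :
    (l.flatMap f).sum = (l.map (fun a => (f a).sum)).sum := by
  rw [List.flatMap_def, List.sum_flatten, List.map_map]; rfl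

-- per-query equality of A's and B's Counters
theorem pvQuery_eq (query : List String) (inverted_index : List (String × List (String × Int))) :
    (query.foldl (fun (result : PySem.Dict String Int) token =>
        match List.lookup token inverted_index with
        | some postings => postings.foldl (fun (result : PySem.Dict String Int) p =>
            result.modify p.1 0 (· + p.2)) result
        | none => result) PySem.Dict.empty).items
      = pvQueryScores query inverted_index := by
  rw [pvQueryScores, pvFoldA, pvFoldB, pvItems_apply, pvItems_apply]
  set opsA := query.flatMap (pvPost inverted_index) with hA
  set opsB := (PySem.Dict.counter query).items.flatMap
      (fun tc => (pvPost inverted_index tc.1).map (fun p => (p.1, tc.2 * p.2))) with hB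
  have hkeys : PySem.Set.ofList (opsA.map Prod.fst) = PySem.Set.ofList (opsB.map Prod.fst) := by
    rw [hA, hB, List.map_flatMap, List.map_flatMap, PySem.Dict.items_counter, List.flatMap_map,
      ← pvOfList_flatMap_ofList query (fun t => (pvPost inverted_index t).map Prod.fst)]
    apply congrArg
    simp [List.map_map, Function.comp_def]
  have hsums : ∀ k, pvSumFor k opsA = pvSumFor k opsB := by
    intro k
    have hAside : pvSumFor k opsA = (query.map (fun t => pvSumFor k (pvPost inverted_index t))).sum := by
      rw [hA, pvSumFor, List.filter_flatMap, List.map_flatMap, pvSum_flatMap]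
      rfl
    have hBside : pvSumFor k opsB
        = ((PySem.Set.ofList query).map (fun t => (query.count t : Int) * pvSumFor k (pvPost inverted_index t))).sum := by
      rw [hB, pvSumFor, List.filter_flatMap, List.map_flatMap, pvSum_flatMap,
        PySem.Dict.items_counter, List.map_map]
      apply congrArg
      apply List.map_congr_left
      intro t _
      simp only [Function.comp]
      rw [List.filter_map, List.map_map]
      have hfil : ((fun p : String × Int => p.1 == k) ∘ fun p : String × Int => (p.1, (query.count t : Int) * p.2))
          = fun p : String × Int => p.1 == k := rfl
      rw [hfil]
      have : ((fun p : String × Int => p.2) ∘ fun p : String × Int => (p.1, (query.count t : Int) * p.2))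
          = fun p : String × Int => (query.count t : Int) * p.2 := rfl
      rw [this, pvSumFor, List.sum_map_mul_left]
    rw [hAside, hBside, pvSum_grouped]
  rw [hkeys]
  exact List.map_congr_left (fun k _ => by rw [hsums k])

-- ===== VERDICT (by name: the statement is the Claim_ definition above) =====
theorem simple_tf_spec : Claim_equal_simple_tf := by
  intro indexed_queries inverted_index _
  unfold Spec_simple_tf simple_tf simple_tf_alt
  rw [PySem.List.foldl_append_singleton_eq_map]
  exact List.map_congr_left (fun q _ => pvQuery_eq q inverted_index)
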